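-- pv_equiv track=rewrite | github.com/SVCE-ACM/A-December-Of_Algorithms-2024 | December 28/Py_MukundhArul.py | can_organize_books
-- ===== SOURCE A (Python) =====
-- from collections import Counter
--
-- def can_organize_books(books, shelfSize):
--     if len(books) % shelfSize != 0:
--         return False
--
--     book_count = Counter(books)
--     unique_books = sorted(book_count.keys())
--
--     for book in unique_books:
--         while book_count[book] > 0:
--             for i in range(shelfSize):
--                 if book_count[book + i] <= 0:
--                     return False
--                 book_count[book + i] -= 1
--
--     return True
-- ===== SOURCE B (Python) =====
-- from collections import Counter
--
-- def can_organize_books(books, shelfSize):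
--     if len(books) % shelfSize != 0:
--         return False
--     count = Counter(books)
--     for x in sorted(count):
--         c = count[x]
--         if c > 0:
--             for y in range(x, x + shelfSize):
--                 if count[y] < c:
--                     return False
--                 count[y] -= c
--     return True
-- ===== Notes on version B (the rewrite author's own statement) =====
-- stated objective: alternative
-- what changed: Replaces A's per-copy while-loop (which removes one run of length shelfSize at a time, re-scanning the window once per copy) by the batch greedy: for each distinct start value x with count c, one pass over the window subtracts the whole multiplicity c at once.
import Mathlib
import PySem

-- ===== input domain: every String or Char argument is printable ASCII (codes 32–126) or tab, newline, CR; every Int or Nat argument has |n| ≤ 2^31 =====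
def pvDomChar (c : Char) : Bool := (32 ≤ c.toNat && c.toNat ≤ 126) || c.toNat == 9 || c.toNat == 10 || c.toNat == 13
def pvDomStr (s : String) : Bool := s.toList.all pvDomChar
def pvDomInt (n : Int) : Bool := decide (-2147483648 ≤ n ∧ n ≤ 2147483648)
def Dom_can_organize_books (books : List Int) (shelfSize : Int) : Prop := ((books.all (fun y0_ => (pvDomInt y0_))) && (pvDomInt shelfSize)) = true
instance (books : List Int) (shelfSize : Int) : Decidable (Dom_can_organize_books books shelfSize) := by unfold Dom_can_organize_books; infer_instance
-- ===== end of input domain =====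

-- B replaces A's one-run-at-a-time while loop by a single batch decrement (by the whole
-- multiplicity) per distinct start value: a different greedy decomposition, similar cost.

-- ===== PORT A =====
-- inner 'for i in range(shelfSize)': decrement each window position by 1, or fail
def aPass (book : Int) : List Int → PySem.Dict Int Int → Option (PySem.Dict Int Int)
  | [], d => some d
  | i :: rest, d =>
    if d.getD (book + i) 0 ≤ 0 then none
    else aPass book rest (d.insert (book + i) (d.getD (book + i) 0 - 1))

-- 'while book_count[book] > 0': fueled (the fuel books.length+1 always suffices under Pre_)
def aWhile (book : Int) (s : Int) : Nat → PySem.Dict Int Int → Option (PySem.Dict Int Int)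
  | 0, _ => none
  | fuel + 1, d =>
    if 0 < d.getD book 0 then
      match aPass book (PySem.List.pyRange 0 s 1) d with
      | none => none
      | some d' => aWhile book s fuel d'
    else some d

def aLoop (s : Int) (fuel : Nat) : List Int → PySem.Dict Int Int → Option (PySem.Dict Int Int)
  | [], d => some d
  | b :: rest, d =>
    match aWhile b s fuel d with
    | none => none
    | some d' => aLoop s fuel rest d'

def can_organize_books (books : List Int) (shelfSize : Int) : Bool :=
  if PySem.Int.mod (books.length : Int) shelfSize ≠ 0 then false
  else
    let book_count := PySem.Dict.counter books
    let unique_books := PySem.List.sorted book_count.keys (fun x => x) false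
    (aLoop shelfSize (books.length + 1) unique_books book_count).isSome

-- ===== PORT B =====
-- inner 'for y in range(x, x + shelfSize)': subtract the whole multiplicity c at once
def bRun (c : Int) : List Int → PySem.Dict Int Int → Option (PySem.Dict Int Int)
  | [], d => some d
  | y :: rest, d =>
    if d.getD y 0 < c then none
    else bRun c rest (d.insert y (d.getD y 0 - c))

def bLoop (s : Int) : List Int → PySem.Dict Int Int → Option (PySem.Dict Int Int)
  | [], d => some d
  | x :: rest, d =>
    let c := d.getD x 0
    if 0 < c then
      match bRun c (PySem.List.pyRange x (x + s) 1) d with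
      | none => none
      | some d' => bLoop s rest d'
    else bLoop s rest d

def can_organize_books_alt (books : List Int) (shelfSize : Int) : Bool :=
  if PySem.Int.mod (books.length : Int) shelfSize ≠ 0 then false
  else
    let count := PySem.Dict.counter books
    (bLoop shelfSize (PySem.List.sorted count.keys (fun x => x) false) count).isSome

-- ===== PRECONDITION & SPEC =====
-- Pre_ excludes only non-returning inputs: shelfSize = 0 (A raises ZeroDivisionError in the
-- modulo guard) and shelfSize < 0 with nonempty books of length divisible by shelfSize
-- (A's while loop never terminates there, since range(shelfSize) is empty).
def Pre_can_organize_books (books : List Int) (shelfSize : Int) : Prop :=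
  shelfSize ≠ 0 ∧
    (0 < shelfSize ∨ PySem.Int.mod (books.length : Int) shelfSize ≠ 0 ∨ books = [])
instance (books : List Int) (shelfSize : Int) : Decidable (Pre_can_organize_books books shelfSize) := by
  unfold Pre_can_organize_books; infer_instance

def pvWitness_can_organize_books : List Int × Int := ([3, 1, 2, 2, 3, 4], 3)

def Spec_can_organize_books (books : List Int) (shelfSize : Int) (out : Bool) : Prop := out = can_organize_books_alt books shelfSize
instance (books : List Int) (shelfSize : Int) (out : Bool) : Decidable (Spec_can_organize_books books shelfSize out) := by unfold Spec_can_organize_books; infer_instance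

-- ===== CLAIM (what is proved, stated in full; the proofs are below) =====
def Claim_equal_can_organize_books : Prop := ∀ (books : List Int) (shelfSize : Int), Dom_can_organize_books books shelfSize → Pre_can_organize_books books shelfSize → Spec_can_organize_books books shelfSize (can_organize_books books shelfSize)

-- ===== LEMMAS AND PROOFS =====

-- pointwise relation on optional dicts: both fail, or both succeed with equal counts
def OR (o1 o2 : Option (PySem.Dict Int Int)) : Prop :=
  match o1, o2 with
  | none, none => True
  | some d1, some d2 => ∀ y, d1.getD y 0 = d2.getD y 0
  | _, _ => False

theorem OR_trans {o1 o2 o3 : Option (PySem.Dict Int Int)} (h1 : OR o1 o2) (h2 : OR o2 o3) : OR o1 o3 := by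
  cases o1 <;> cases o2 <;> cases o3 <;> simp_all [OR]

theorem OR_isSome {o1 o2 : Option (PySem.Dict Int Int)} (h : OR o1 o2) : o1.isSome = o2.isSome := by
  cases o1 <;> cases o2 <;> simp_all [OR]

def decAD (book : Int) (is : List Int) (d : PySem.Dict Int Int) : PySem.Dict Int Int :=
  is.foldl (fun d i => d.insert (book + i) (d.getD (book + i) 0 - 1)) d

def decBD (c : Int) (ys : List Int) (d : PySem.Dict Int Int) : PySem.Dict Int Int :=
  ys.foldl (fun d y => d.insert y (d.getD y 0 - c)) d

theorem getD_decAD (book : Int) (is : List Int) (h : is.Nodup) (d : PySem.Dict Int Int) (y : Int) :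
    (decAD book is d).getD y 0 = if (y - book) ∈ is then d.getD y 0 - 1 else d.getD y 0 := by
  induction is generalizing d with
  | nil => simp [decAD]
  | cons i rest ih =>
    simp only [List.nodup_cons] at h
    have := ih h.2 (d.insert (book + i) (d.getD (book + i) 0 - 1)) 
    simp only [decAD, List.foldl_cons] at *
    rw [this]
    rw [PySem.Dict.getD_insert]
    by_cases hm : (y - book) ∈ rest
    · have hne : y ≠ book + i := by
        intro he
        have h2 : y - book = i := by omega
        exact h.1 (h2 ▸ hm)
      simp [hm, hne]
    · by_cases he : y = book + i
      · have h2 : y - book = i := by omega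
        simp [hm, he, h2, h.1]
      · have h2 : y - book ≠ i := by omega
        simp [hm, he, h2]

theorem getD_decBD (c : Int) (ys : List Int) (h : ys.Nodup) (d : PySem.Dict Int Int) (y : Int) :
    (decBD c ys d).getD y 0 = if y ∈ ys then d.getD y 0 - c else d.getD y 0 := by
  induction ys generalizing d with
  | nil => simp [decBD]
  | cons z rest ih =>
    simp only [List.nodup_cons] at h
    have := ih h.2 (d.insert z (d.getD z 0 - c))
    simp only [decBD, List.foldl_cons] at *
    rw [this]
    rw [PySem.Dict.getD_insert]
    by_cases hm : y ∈ rest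
    · have hne : y ≠ z := fun he => h.1 (he ▸ hm)
      simp [hm, hne]
    · by_cases he : y = z
      · simp [hm, he, h.1]
      · simp [hm, he]

theorem aPass_eq (book : Int) (is : List Int) (h : is.Nodup) (d : PySem.Dict Int Int) :
    aPass book is d = if ∀ i ∈ is, 0 < d.getD (book + i) 0 then some (decAD book is d) else none := by
  induction is generalizing d with
  | nil => simp [aPass, decAD]
  | cons i rest ih =>
    simp only [List.nodup_cons] at h
    simp only [aPass, List.forall_mem_cons]
    by_cases h0 : d.getD (book + i) 0 ≤ 0
    · have : ¬ (0 < d.getD (book + i) 0) := by omega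
      simp [h0, this]
    · have hpos : 0 < d.getD (book + i) 0 := by omega
      rw [if_neg h0, ih h.2]
      have hcond : (∀ j ∈ rest, 0 < (d.insert (book + i) (d.getD (book + i) 0 - 1)).getD (book + j) 0)
          ↔ (∀ j ∈ rest, 0 < d.getD (book + j) 0) := by
        apply forall₂_congr; intro j hj
        have hne : book + j ≠ book + i := by
          have : j ≠ i := fun he => h.1 (he ▸ hj)
          omega
        rw [PySem.Dict.getD_insert, if_neg hne]
      simp only [decAD, List.foldl_cons]
      simp only [hcond]
      by_cases hrest : ∀ j ∈ rest, 0 < d.getD (book + j) 0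
      · simp [hrest, hpos]
      · simp [hrest]

theorem bRun_eq (c : Int) (ys : List Int) (h : ys.Nodup) (d : PySem.Dict Int Int) :
    bRun c ys d = if ∀ y ∈ ys, c ≤ d.getD y 0 then some (decBD c ys d) else none := by
  induction ys generalizing d with
  | nil => simp [bRun, decBD]
  | cons z rest ih =>
    simp only [List.nodup_cons] at h
    simp only [bRun, List.forall_mem_cons]
    by_cases h0 : d.getD z 0 < c
    · have : ¬ (c ≤ d.getD z 0) := by omega
      simp [h0, this]
    · have hok : c ≤ d.getD z 0 := by omega
      rw [if_neg h0, ih h.2]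
      have hcond : (∀ y ∈ rest, c ≤ (d.insert z (d.getD z 0 - c)).getD y 0)
          ↔ (∀ y ∈ rest, c ≤ d.getD y 0) := by
        apply forall₂_congr; intro y hy
        have hne : y ≠ z := fun he => h.1 (he ▸ hy)
        rw [PySem.Dict.getD_insert, if_neg hne]
      simp only [decBD, List.foldl_cons]
      simp only [hcond]
      by_cases hrest : ∀ y ∈ rest, c ≤ d.getD y 0
      · simp [hrest, hok]
      · simp [hrest]

theorem while_step (book s : Int) (hs : 0 < s) :
    ∀ (c fuel : Nat) (dA dB : PySem.Dict Int Int),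
      (∀ y, dA.getD y 0 = dB.getD y 0) → dA.getD book 0 = (c : Int) → c < fuel →
      OR (aWhile book s fuel dA)
        (if (0 : Int) < (c : Int) then bRun (c : Int) (PySem.List.pyRange book (book + s) 1) dB
         else some dB) := by
  have hnodA : (PySem.List.pyRange 0 s 1).Nodup := PySem.List.nodup_pyRange_one 0 s
  have hnodB : ∀ b : Int, (PySem.List.pyRange b (b + s) 1).Nodup :=
    fun b => PySem.List.nodup_pyRange_one b (b + s)
  intro c
  induction c with
  | zero =>
    intro fuel dA dB hpt hc hf
    obtain ⟨f, rfl⟩ : ∃ f, fuel = f + 1 := ⟨fuel - 1, by omega⟩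
    have h0 : ¬ (0:Int) < ((0:Nat):Int) := by norm_num
    simp only [aWhile, hc]
    rw [if_neg h0, if_neg h0]
    simpa [OR] using hpt
  | succ c ih =>
    intro fuel dA dB hpt hc hf
    obtain ⟨f, rfl⟩ : ∃ f, fuel = f + 1 := ⟨fuel - 1, by omega⟩
    have hguard : 0 < dA.getD book 0 := by rw [hc]; exact_mod_cast Nat.succ_pos c
    simp only [aWhile, if_pos hguard]
    rw [aPass_eq book _ hnodA dA]
    rw [if_pos (by exact_mod_cast Nat.succ_pos c : (0:Int) < ((c+1 : Nat) : Int))]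
    rw [bRun_eq _ _ (hnodB book) dB]
    have hmem : ∀ y : Int, y ∈ PySem.List.pyRange book (book + s) 1 ↔ (y - book) ∈ PySem.List.pyRange 0 s 1 := by
      intro y; rw [PySem.List.mem_pyRange_one, PySem.List.mem_pyRange_one]; omega
    by_cases hall : ∀ i ∈ PySem.List.pyRange 0 s 1, 0 < dA.getD (book + i) 0
    · rw [if_pos hall]
      -- all window positions positive in dA
      have hallB : ∀ y ∈ PySem.List.pyRange book (book + s) 1, (1:Int) ≤ dB.getD y 0 := by
        intro y hy
        have h1 := hall (y - book) ((hmem y).1 hy)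
        rw [hpt] at h1
        have he : book + (y - book) = y := by omega
        rw [he] at h1
        omega
      have hbookmem : (0:Int) ∈ PySem.List.pyRange 0 s 1 := by
        rw [PySem.List.mem_pyRange_one]; omega
      have hA' : ∀ y, (decAD book (PySem.List.pyRange 0 s 1) dA).getD y 0
          = (decBD 1 (PySem.List.pyRange book (book + s) 1) dB).getD y 0 := by
        intro y
        rw [getD_decAD _ _ hnodA, getD_decBD _ _ (hnodB book), hpt y]
        simp only [hmem y]
      have hcA' : (decAD book (PySem.List.pyRange 0 s 1) dA).getD book 0 = (c : Int) := by
        rw [getD_decAD _ _ hnodA]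
        have : book - book = (0:Int) := by omega
        rw [this, if_pos hbookmem, hc]
        push_cast; ring
      have hIH := ih f (decAD book (PySem.List.pyRange 0 s 1) dA)
        (decBD 1 (PySem.List.pyRange book (book + s) 1) dB) hA' hcA' (by omega)
      by_cases hc0 : 0 < c
      · rw [if_pos (by exact_mod_cast hc0 : (0:Int) < (c:Int))] at hIH
        refine OR_trans hIH ?_
        -- OR (bRun c ys (decBD 1 ys dB)) (bRun (c+1) ys dB): both already in characterized form
        have hcnd : (∀ y ∈ PySem.List.pyRange book (book + s) 1,
              (c:Int) ≤ (decBD 1 (PySem.List.pyRange book (book + s) 1) dB).getD y 0)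
            ↔ (∀ y ∈ PySem.List.pyRange book (book + s) 1, ((c+1 : Nat):Int) ≤ dB.getD y 0) := by
          apply forall₂_congr; intro y hy
          rw [getD_decBD _ _ (hnodB book), if_pos hy]
          push_cast; omega
        rw [bRun_eq ((c:Nat):Int) _ (hnodB book) (decBD 1 (PySem.List.pyRange book (book + s) 1) dB)]
        by_cases hcase : ∀ y ∈ PySem.List.pyRange book (book + s) 1, ((c+1 : Nat):Int) ≤ dB.getD y 0
        · rw [if_pos (hcnd.2 hcase), if_pos hcase]
          intro y
          rw [getD_decBD _ _ (hnodB book), getD_decBD _ _ (hnodB book), getD_decBD _ _ (hnodB book)]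
          by_cases hy : y ∈ PySem.List.pyRange book (book + s) 1
          · simp only [hy, if_pos]; push_cast; ring
          · simp [hy]
        · rw [if_neg (fun hh => hcase (hcnd.1 hh)), if_neg hcase]
          trivial
      · -- c = 0: one final pass; bRun 1 succeeds
        have hc00 : c = 0 := by omega
        subst hc00
        rw [if_neg (by omega : ¬ (0:Int) < ((0:Nat):Int))] at hIH
        refine OR_trans hIH ?_
        rw [if_pos (by intro y hy; have := hallB y hy; push_cast; omega)]
        intro y
        rw [getD_decBD _ _ (hnodB book), getD_decBD _ _ (hnodB book)]
        by_cases hy : y ∈ PySem.List.pyRange book (book + s) 1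
        · simp only [hy, if_pos]; push_cast; ring
        · simp [hy]
    · rw [if_neg hall]
      rw [if_neg ?_]
      · trivial
      · intro hh
        apply hall
        intro i hi
        have hy : book + i ∈ PySem.List.pyRange book (book + s) 1 := by
          rw [hmem]; simpa using hi
        have := hh _ hy
        rw [← hpt] at this
        push_cast at this
        omega

theorem loop_sim (s : Int) (hs : 0 < s) (fuel : Nat) :
    ∀ (keys : List Int) (dA dB : PySem.Dict Int Int),
      (∀ y, dA.getD y 0 = dB.getD y 0) →
      (∀ y, 0 ≤ dB.getD y 0) →
      (∀ y, (dB.getD y 0).toNat < fuel) →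
      OR (aLoop s fuel keys dA) (bLoop s keys dB) := by
  intro keys
  induction keys with
  | nil => intro dA dB hpt _ _; simpa [aLoop, bLoop, OR] using hpt
  | cons b rest ih =>
    intro dA dB hpt hnn hbd
    have hc : dA.getD b 0 = ((dB.getD b 0).toNat : Int) := by
      rw [hpt]; exact (Int.toNat_of_nonneg (hnn b)).symm
    have hstep := while_step b s hs (dB.getD b 0).toNat fuel dA dB hpt hc (hbd b)
    simp only [aLoop, bLoop]
    by_cases hpos : (0:Int) < dB.getD b 0
    · rw [if_pos (by rw [Int.toNat_of_nonneg (hnn b)]; exact hpos)] at hstep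
      rw [Int.toNat_of_nonneg (hnn b)] at hstep
      rw [if_pos hpos]
      cases hA : aWhile b s fuel dA with
      | none =>
        rw [hA] at hstep
        cases hB : bRun (dB.getD b 0) (PySem.List.pyRange b (b + s) 1) dB with
        | none => trivial
        | some d' => rw [hB] at hstep; exact absurd hstep (by simp [OR])
      | some dA' =>
        rw [hA] at hstep
        cases hB : bRun (dB.getD b 0) (PySem.List.pyRange b (b + s) 1) dB with
        | none => rw [hB] at hstep; exact absurd hstep (by simp [OR])
        | some dB' =>
          rw [hB] at hstep
          apply ih dA' dB' hstep
          · -- nonneg preserved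
            have hreq := bRun_eq (dB.getD b 0) _ (PySem.List.nodup_pyRange_one b (b + s)) dB
            rw [hB] at hreq
            by_cases hcnd : ∀ y ∈ PySem.List.pyRange b (b + s) 1, dB.getD b 0 ≤ dB.getD y 0
            · rw [if_pos hcnd] at hreq
              have hdB' : dB' = decBD (dB.getD b 0) (PySem.List.pyRange b (b + s) 1) dB :=
                Option.some.inj hreq
              intro y
              rw [hdB', getD_decBD _ _ (PySem.List.nodup_pyRange_one b (b + s))]
              by_cases hy : y ∈ PySem.List.pyRange b (b + s) 1
              · rw [if_pos hy]; have := hcnd y hy; omega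
              · rw [if_neg hy]; exact hnn y
            · rw [if_neg hcnd] at hreq; exact absurd hreq (by simp)
          · -- bound preserved (values only decrease)
            have hreq := bRun_eq (dB.getD b 0) _ (PySem.List.nodup_pyRange_one b (b + s)) dB
            rw [hB] at hreq
            by_cases hcnd : ∀ y ∈ PySem.List.pyRange b (b + s) 1, dB.getD b 0 ≤ dB.getD y 0
            · rw [if_pos hcnd] at hreq
              have hdB' : dB' = decBD (dB.getD b 0) (PySem.List.pyRange b (b + s) 1) dB :=
                Option.some.inj hreq
              intro y
              rw [hdB', getD_decBD _ _ (PySem.List.nodup_pyRange_one b (b + s))]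
              by_cases hy : y ∈ PySem.List.pyRange b (b + s) 1
              · rw [if_pos hy]
                have h1 := hbd y
                have h2 := hpos
                omega
              · rw [if_neg hy]; exact hbd y
            · rw [if_neg hcnd] at hreq; exact absurd hreq (by simp)
    · rw [if_neg (by omega : ¬ (0:Int) < ((dB.getD b 0).toNat : Int))] at hstep
      rw [if_neg hpos]
      cases hA : aWhile b s fuel dA with
      | none => rw [hA] at hstep; exact absurd hstep (by simp [OR])
      | some dA' =>
        rw [hA] at hstep
        exact ih dA' dB hstep hnn hbd

-- ===== VERDICT (by name: the statement is the Claim_ definition above) =====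
theorem can_organize_books_spec : Claim_equal_can_organize_books := by
  intro books shelfSize _ hpre
  obtain ⟨hs0, hcase⟩ := hpre
  unfold Spec_can_organize_books can_organize_books can_organize_books_alt
  by_cases hmod : PySem.Int.mod (books.length : Int) shelfSize ≠ 0
  · rw [if_pos hmod, if_pos hmod]
  · rw [if_neg hmod, if_neg hmod]
    rw [not_not] at hmod
    rcases hcase with hs | hmod' | hnil
    · -- positive shelfSize: the simulation
      have hsim := loop_sim shelfSize hs (books.length + 1)
        (PySem.List.sorted (PySem.Dict.counter books).keys (fun x => x) false)
        (PySem.Dict.counter books) (PySem.Dict.counter books)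
        (fun _ => rfl)
        (by intro y; rw [PySem.Dict.getD_counter]; exact_mod_cast Nat.zero_le _)
        (by intro y; rw [PySem.Dict.getD_counter]
            have := List.count_le_length (l := books) (a := y)
            simp only [Int.toNat_natCast]
            omega)
      exact OR_isSome hsim
    · exact absurd hmod hmod'
    · subst hnil
      have hnil' : PySem.List.sorted ([] : List Int) (fun x => x) false = [] := by
        rw [PySem.List.sorted_eq_nil_iff]
      simp [PySem.Dict.counter, hnil', aLoop, bLoop]
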